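-- pv_equiv track=rewrite | github.com/Mbskl2/praca_inzynierska | letter_segmentation.py | divide_into_groups_of_adjecent_borders
-- ===== SOURCE A (Python) =====
-- def divide_into_groups_of_adjecent_borders(borders):
--     border_groups = []
--     for i in range(len(borders)):
--         if i == 0:
--             border_groups.append([borders[0]])
--             continue
--         for group in border_groups:
--             if group[-1] < borders[i] <= (group[-1] + 1):
--                 group.append(borders[i])
--                 break
--         else:
--             border_groups.append([borders[i]])
--     return border_groups
-- ===== SOURCE B (Python) =====
-- def divide_into_groups_of_adjecent_borders(borders):
--     groups = []
--     by_last = {}  # last value of a group -> ascending list of indices of groups ending there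
--     for b in borders:
--         idxs = by_last.get(b - 1)
--         if idxs:
--             i = idxs.pop(0)
--             groups[i].append(b)
--         else:
--             i = len(groups)
--             groups.append([b])
--         dest = by_last.setdefault(b, [])
--         k = 0
--         while k < len(dest) and dest[k] <= i:
--             k += 1
--         dest.insert(k, i)
--     return groups
-- ===== Notes on version B (the rewrite author's own statement) =====
-- stated objective: faster
-- what changed: Replaced the inner linear scan over all existing groups by a dict mapping each group's last value to the ascending list of indices of groups ending there, so each border is routed to the earliest eligible group by one dict lookup.
import Mathlib
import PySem

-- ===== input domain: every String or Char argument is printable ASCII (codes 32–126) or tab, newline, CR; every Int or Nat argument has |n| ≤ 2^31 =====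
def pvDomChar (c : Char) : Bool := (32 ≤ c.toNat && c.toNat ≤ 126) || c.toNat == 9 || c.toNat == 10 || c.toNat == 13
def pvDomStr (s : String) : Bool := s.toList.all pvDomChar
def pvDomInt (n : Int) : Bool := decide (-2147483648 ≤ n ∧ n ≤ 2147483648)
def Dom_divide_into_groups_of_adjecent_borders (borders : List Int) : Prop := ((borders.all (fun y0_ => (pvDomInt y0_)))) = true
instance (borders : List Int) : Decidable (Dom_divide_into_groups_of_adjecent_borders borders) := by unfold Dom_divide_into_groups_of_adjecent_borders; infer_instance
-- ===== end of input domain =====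

-- B replaces A's inner scan over all groups by a dict from each group's last value to the
-- ascending list of indices of groups ending there (objective: faster).

-- ===== PORT A =====
-- inner 'for group in border_groups: … break / else: append' loop of A
def pvUpdFirst (b : Int) : List (List Int) → List (List Int)
  | [] => [[b]]
  | g :: gs =>
    match PySem.List.pyGet? g (-1) with
    | some last => if last < b ∧ b ≤ last + 1 then (g ++ [b]) :: gs else g :: pvUpdFirst b gs
    | none => g :: pvUpdFirst b gs   -- unreachable: groups are never empty (IndexError guard)

def divide_into_groups_of_adjecent_borders (borders : List Int) : List (List Int) :=
  (PySem.List.enumerate borders).foldl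
    (fun border_groups p => if p.1 == 0 then border_groups ++ [[p.2]] else pvUpdFirst p.2 border_groups) []

-- ===== PORT B =====
-- 'k = 0; while k < len(dest) and dest[k] <= i: k += 1; dest.insert(k, i)'
def pvInsSorted (i : Int) : List Int → List Int
  | [] => [i]
  | x :: xs => if x ≤ i then x :: pvInsSorted i xs else i :: x :: xs

-- 'groups[i].append(b)'
def pvAppendAt (i b : Int) : List (List Int) → List (List Int)
  | [] => []
  | g :: gs => if i == 0 then (g ++ [b]) :: gs else g :: pvAppendAt (i - 1) b gs

def pvStepB (st : List (List Int) × PySem.Dict Int (List Int)) (b : Int) :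
    List (List Int) × PySem.Dict Int (List Int) :=
  match st.2.get? (b - 1) with
  | some (i :: is) =>
      let groups := pvAppendAt i b st.1
      let d := st.2.insert (b - 1) is
      (groups, d.insert b (pvInsSorted i (d.getD b [])))
  | _ =>
      let i : Int := PySem.List.len st.1
      (st.1 ++ [[b]], st.2.insert b (pvInsSorted i (st.2.getD b [])))

def divide_into_groups_of_adjecent_borders_alt (borders : List Int) : List (List Int) :=
  (borders.foldl pvStepB ([], PySem.Dict.empty)).1

-- ===== PRECONDITION & SPEC =====
def Spec_divide_into_groups_of_adjecent_borders (borders : List Int) (out : List (List Int)) : Prop := out = divide_into_groups_of_adjecent_borders_alt borders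
instance (borders : List Int) (out : List (List Int)) : Decidable (Spec_divide_into_groups_of_adjecent_borders borders out) := by unfold Spec_divide_into_groups_of_adjecent_borders; infer_instance

-- ===== CLAIM (what is proved, stated in full; the proofs are below) =====
def Claim_equal_divide_into_groups_of_adjecent_borders : Prop := ∀ (borders : List Int), Dom_divide_into_groups_of_adjecent_borders borders → Spec_divide_into_groups_of_adjecent_borders borders (divide_into_groups_of_adjecent_borders borders)

-- ===== LEMMAS AND PROOFS =====

-- ascending list of indices (starting at k) of the groups whose last element is v
def pvAsc (v k : Int) : List (List Int) → List Int
  | [] => []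
  | g :: gs => if g.getLast? = some v then k :: pvAsc v (k + 1) gs else pvAsc v (k + 1) gs

def pvInv (gs : List (List Int)) (d : PySem.Dict Int (List Int)) : Prop :=
  (∀ g ∈ gs, g ≠ []) ∧ ∀ v, d.getD v [] = pvAsc v 0 gs

lemma pvAsc_ge {v : Int} : ∀ {gs : List (List Int)} {k x : Int}, x ∈ pvAsc v k gs → k ≤ x := by
  intro gs
  induction gs with
  | nil => intro k x h; simp [pvAsc] at h
  | cons g gs ih =>
    intro k x h
    simp only [pvAsc] at h
    split at h
    · rcases List.mem_cons.1 h with h | h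
      · omega
      · have := ih h; omega
    · have := ih h; omega

lemma pvAsc_lt {v : Int} : ∀ {gs : List (List Int)} {k x : Int}, x ∈ pvAsc v k gs → x < k + gs.length := by
  intro gs
  induction gs with
  | nil => intro k x h; simp [pvAsc] at h
  | cons g gs ih =>
    intro k x h
    simp only [pvAsc] at h
    split at h
    · rcases List.mem_cons.1 h with h | h
      · subst h; simp only [List.length_cons]; omega
      · have := ih h; simp only [List.length_cons]; omega
    · have := ih h; simp only [List.length_cons]; omega

lemma pvInsSorted_append {i : Int} : ∀ {l : List Int}, (∀ x ∈ l, x ≤ i) → pvInsSorted i l = l ++ [i] := by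
  intro l
  induction l with
  | nil => intro _; rfl
  | cons x xs ih =>
    intro h
    have hx : x ≤ i := h x (by simp)
    simp [pvInsSorted, hx, ih (fun y hy => h y (by simp [hy]))]

lemma pvInsSorted_cons_of_lt {i : Int} {l : List Int} (h : ∀ x ∈ l, i < x) : pvInsSorted i l = i :: l := by
  cases l with
  | nil => rfl
  | cons x xs =>
    have := h x (by simp)
    simp [pvInsSorted]; omega

-- A's inner loop when no group ends at b-1: a new group is opened
lemma pvUpdFirst_none {b : Int} : ∀ {gs : List (List Int)} {k : Int}, (∀ g ∈ gs, g ≠ []) →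
    pvAsc (b - 1) k gs = [] → pvUpdFirst b gs = gs ++ [[b]] := by
  intro gs
  induction gs with
  | nil => intro k _ _; rfl
  | cons g gs ih =>
    intro k hne hasc
    have hg : g ≠ [] := hne g (by simp)
    obtain ⟨l, hl⟩ : ∃ l, g.getLast? = some l := by
      cases hhl : g.getLast? with
      | none => exact absurd (List.getLast?_eq_none_iff.1 hhl) hg
      | some l => exact ⟨l, rfl⟩
    simp only [pvAsc, hl] at hasc
    have hlb : l ≠ b - 1 := by
      intro h; rw [if_pos (by rw [h])] at hasc; simp at hasc
    rw [if_neg (by simp [hlb])] at hasc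
    simp only [pvUpdFirst, PySem.List.pyGet?_neg_one, hl]
    rw [if_neg (by omega)]
    simp [ih (fun g' hg' => hne g' (by simp [hg'])) hasc]

-- A's inner loop when groups end at b-1: b joins the first (least-index) one
lemma pvUpdFirst_some {b : Int} : ∀ {gs : List (List Int)} {k i : Int} {is : List Int},
    (∀ g ∈ gs, g ≠ []) → pvAsc (b - 1) k gs = i :: is →
    pvUpdFirst b gs = pvAppendAt (i - k) b gs := by
  intro gs
  induction gs with
  | nil => intro k i is _ h; simp [pvAsc] at h
  | cons g gs ih =>
    intro k i is hne hasc
    have hg : g ≠ [] := hne g (by simp)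
    obtain ⟨l, hl⟩ : ∃ l, g.getLast? = some l := by
      cases hhl : g.getLast? with
      | none => exact absurd (List.getLast?_eq_none_iff.1 hhl) hg
      | some l => exact ⟨l, rfl⟩
    simp only [pvAsc, hl] at hasc
    by_cases hlb : l = b - 1
    · rw [if_pos (by rw [hlb])] at hasc
      have hik : k = i := (List.cons.injEq _ _ _ _ ▸ hasc).1
      have happ : pvAppendAt (i - k) b (g :: gs) = (g ++ [b]) :: gs := by
        rw [show i - k = 0 by omega]; simp [pvAppendAt]
      rw [happ]
      simp only [pvUpdFirst, PySem.List.pyGet?_neg_one, hl]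
      rw [if_pos (by omega)]
    · rw [if_neg (by simp [hlb])] at hasc
      have hik : k + 1 ≤ i := pvAsc_ge (hasc ▸ List.mem_cons_self ..)
      have happ : pvAppendAt (i - k) b (g :: gs) = g :: pvAppendAt (i - (k + 1)) b gs := by
        have h0 : (i - k == 0) = false := by simp; omega
        simp only [pvAppendAt, h0, Bool.false_eq_true, if_false]
        rw [show i - k - 1 = i - (k + 1) by omega]
      rw [happ]
      simp only [pvUpdFirst, PySem.List.pyGet?_neg_one, hl]
      rw [if_neg (by omega)]
      rw [ih (fun g' hg' => hne g' (by simp [hg'])) hasc]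

lemma pvAppendAt_nonempty {i b : Int} : ∀ {gs : List (List Int)}, (∀ g ∈ gs, g ≠ []) →
    ∀ g ∈ pvAppendAt i b gs, g ≠ [] := by
  intro gs
  induction gs generalizing i with
  | nil => intro _ g hg; simp [pvAppendAt] at hg
  | cons g0 gs ih =>
    intro hne g hg
    simp only [pvAppendAt] at hg
    split at hg
    · rcases List.mem_cons.1 hg with h | h
      · subst h; simp
      · exact hne g (by simp [h])
    · rcases List.mem_cons.1 hg with h | h
      · exact h ▸ hne g0 (by simp)
      · exact ih (fun g' hg' => hne g' (by simp [hg'])) g h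

lemma pvAsc_append_singleton {v : Int} {g' : List Int} : ∀ {gs : List (List Int)} {k : Int},
    pvAsc v k (gs ++ [g']) = pvAsc v k gs ++ (if g'.getLast? = some v then [k + gs.length] else []) := by
  intro gs
  induction gs with
  | nil => intro k; simp [pvAsc]
  | cons g gs ih =>
    intro k
    simp only [List.cons_append, pvAsc, ih, List.length_cons]
    split <;> simp <;> ring_nf

-- how the index lists change when b is appended to the earliest group ending at b-1
lemma pvAsc_appendAt {b v : Int} : ∀ {gs : List (List Int)} {k i : Int} {is : List Int},
    (∀ g ∈ gs, g ≠ []) → pvAsc (b - 1) k gs = i :: is →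
    pvAsc v k (pvAppendAt (i - k) b gs) =
      if v = b - 1 then is else if v = b then pvInsSorted i (pvAsc v k gs) else pvAsc v k gs := by
  intro gs
  induction gs with
  | nil => intro k i is _ h; simp [pvAsc] at h
  | cons g gs ih =>
    intro k i is hne hasc
    have hg : g ≠ [] := hne g (by simp)
    obtain ⟨l, hl⟩ : ∃ l, g.getLast? = some l := by
      cases hhl : g.getLast? with
      | none => exact absurd (List.getLast?_eq_none_iff.1 hhl) hg
      | some l => exact ⟨l, rfl⟩
    simp only [pvAsc, hl] at hasc
    by_cases hlb : l = b - 1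
    · subst hlb
      rw [if_pos rfl] at hasc
      have hik : k = i := (List.cons.injEq _ _ _ _ ▸ hasc).1
      have htl : pvAsc (b - 1) (k + 1) gs = is := (List.cons.injEq _ _ _ _ ▸ hasc).2
      have happ : pvAppendAt (i - k) b (g :: gs) = (g ++ [b]) :: gs := by
        rw [show i - k = 0 by omega]; simp [pvAppendAt]
      rw [happ]
      have hlast : (g ++ [b]).getLast? = some b := by simp
      by_cases hv1 : v = b - 1
      · subst hv1
        rw [if_pos rfl, ← htl]
        simp only [pvAsc, hlast]
        rw [if_neg (by simp; omega)]
      · by_cases hv2 : v = b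
        · rw [if_neg hv1, if_pos hv2]
          have hL : pvAsc v k ((g ++ [b]) :: gs) = k :: pvAsc v (k + 1) gs := by
            simp only [pvAsc, hlast]; rw [if_pos (by rw [hv2])]
          have hR : pvAsc v k (g :: gs) = pvAsc v (k + 1) gs := by
            simp only [pvAsc, hl]; rw [if_neg (by simp; omega)]
          rw [hL, hR, pvInsSorted_cons_of_lt (fun x hx => by have := pvAsc_ge hx; omega), hik]
        · rw [if_neg hv1, if_neg hv2]
          have hL : pvAsc v k ((g ++ [b]) :: gs) = pvAsc v (k + 1) gs := by
            simp only [pvAsc, hlast]; rw [if_neg (by simp; omega)]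
          have hR : pvAsc v k (g :: gs) = pvAsc v (k + 1) gs := by
            simp only [pvAsc, hl]; rw [if_neg (by simp; omega)]
          rw [hL, hR]
    · rw [if_neg (by simp [hlb])] at hasc
      have hik : k + 1 ≤ i := pvAsc_ge (hasc ▸ List.mem_cons_self ..)
      have happ : pvAppendAt (i - k) b (g :: gs) = g :: pvAppendAt (i - (k + 1)) b gs := by
        have h0 : (i - k == 0) = false := by simp; omega
        simp only [pvAppendAt, h0, Bool.false_eq_true, if_false]
        rw [show i - k - 1 = i - (k + 1) by omega]
      rw [happ]
      have hrec := ih (fun g' hg' => hne g' (by simp [hg'])) hasc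
      by_cases hv1 : v = b - 1
      · subst hv1
        rw [if_pos rfl]
        rw [if_pos rfl] at hrec
        simp only [pvAsc, hl]
        rw [if_neg (by simp [hlb]), hrec]
      · by_cases hv2 : v = b
        · rw [if_neg hv1, if_pos hv2]
          rw [if_neg hv1, if_pos hv2] at hrec
          by_cases hlv : l = v
          · simp only [pvAsc, hl, hlv]
            rw [if_pos trivial, if_pos trivial, hrec]
            have hmv : pvInsSorted i (k :: pvAsc v (k + 1) gs) = k :: pvInsSorted i (pvAsc v (k + 1) gs) := by
              simp only [pvInsSorted]; rw [if_pos (by omega)]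
            rw [hmv]
          · simp only [pvAsc, hl]
            rw [if_neg (by simp [hlv]), if_neg (by simp [hlv]), hrec]
        · rw [if_neg hv1, if_neg hv2]
          rw [if_neg hv1, if_neg hv2] at hrec
          by_cases hlv : l = v
          · simp only [pvAsc, hl, hlv]
            rw [if_pos trivial, if_pos trivial, hrec]
          · simp only [pvAsc, hl]
            rw [if_neg (by simp [hlv]), if_neg (by simp [hlv]), hrec]

-- one step of B computes one step of A and preserves the dict invariant
lemma pvStep_main {gs : List (List Int)} {d : PySem.Dict Int (List Int)} {b : Int} (h : pvInv gs d) :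
    (pvStepB (gs, d) b).1 = pvUpdFirst b gs ∧ pvInv (pvStepB (gs, d) b).1 (pvStepB (gs, d) b).2 := by
  obtain ⟨hne, hd⟩ := h
  have hb1 : b ≠ b - 1 := by omega
  have hnew : pvAsc (b - 1) 0 gs = [] →
      gs ++ [[b]] = pvUpdFirst b gs ∧
      pvInv (gs ++ [[b]]) (d.insert b (pvInsSorted (PySem.List.len gs) (d.getD b []))) := by
    intro hasc
    refine ⟨(pvUpdFirst_none hne hasc).symm, ?_, ?_⟩
    · intro g hg
      rcases List.mem_append.1 hg with hmem | hmem
      · exact hne g hmem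
      · simp at hmem; simp [hmem]
    · intro v
      rw [PySem.Dict.getD_insert, pvAsc_append_singleton]
      by_cases hv : v = b
      · rw [if_pos hv, if_pos (by simp [hv]), hd]
        rw [pvInsSorted_append (fun x hx => by
          have := pvAsc_lt hx; simp only [PySem.List.len_eq]; omega)]
        simp [hv, PySem.List.len_eq]
      · rw [if_neg hv, if_neg (by simp; omega), List.append_nil]
        exact hd v
  cases hget : d.get? (b - 1) with
  | none =>
    have hasc : pvAsc (b - 1) 0 gs = [] := by
      rw [← hd]; simp [PySem.Dict.getD_eq_get?_getD, hget]
    simpa only [pvStepB, hget] using hnew hasc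
  | some L =>
    cases L with
    | nil =>
      have hasc : pvAsc (b - 1) 0 gs = [] := by
        rw [← hd]; simp [PySem.Dict.getD_eq_get?_getD, hget]
      simpa only [pvStepB, hget] using hnew hasc
    | cons i is =>
      have hasc : pvAsc (b - 1) 0 gs = i :: is := by
        rw [← hd]; simp [PySem.Dict.getD_eq_get?_getD, hget]
      have hupd : pvUpdFirst b gs = pvAppendAt i b gs := by
        have := pvUpdFirst_some (k := 0) hne hasc
        simpa using this
      have hgetb : (d.insert (b - 1) is).getD b [] = pvAsc b 0 gs := by
        rw [PySem.Dict.getD_insert, if_neg hb1]; exact hd b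
      simp only [pvStepB, hget]
      refine ⟨hupd.symm, ?_, ?_⟩
      · exact pvAppendAt_nonempty hne
      · intro v
        have hmain := pvAsc_appendAt (b := b) (v := v) (k := 0) hne hasc
        rw [show i - 0 = i by omega] at hmain
        rw [PySem.Dict.getD_insert, hgetb, hmain]
        by_cases hv2 : v = b
        · rw [if_pos hv2, if_neg (by omega), if_pos hv2, hv2]
        · rw [if_neg hv2, PySem.Dict.getD_insert]
          by_cases hv1 : v = b - 1
          · rw [if_pos hv1, if_pos hv1]
          · rw [if_neg hv1, if_neg hv1, if_neg hv2, hd]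

-- B's fold equals A's fold from any invariant state
lemma pvFold_eq : ∀ (bs : List Int) (gs : List (List Int)) (d : PySem.Dict Int (List Int)),
    pvInv gs d → (bs.foldl pvStepB (gs, d)).1 = bs.foldl (fun gs b => pvUpdFirst b gs) gs := by
  intro bs
  induction bs with
  | nil => intro gs d _; rfl
  | cons b bs ih =>
    intro gs d h
    obtain ⟨h1, h2⟩ := pvStep_main (b := b) h
    simp only [List.foldl_cons]
    cases hst : pvStepB (gs, d) b with
    | mk gs' d' =>
      rw [hst] at h1 h2
      simp only at h1 h2
      rw [ih gs' d' h2, h1]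

-- A's enumerate-fold is a plain fold of the inner loop (index 0 opens the first group,
-- which pvUpdFirst on the empty group list also does)
lemma pvA_enum : ∀ (bs : List Int) (s : Int), 1 ≤ s → ∀ gs,
    (PySem.List.enumerate bs s).foldl
      (fun border_groups p => if p.1 == 0 then border_groups ++ [[p.2]] else pvUpdFirst p.2 border_groups) gs
    = bs.foldl (fun gs b => pvUpdFirst b gs) gs := by
  intro bs
  induction bs with
  | nil => intro s _ gs; simp [PySem.List.enumerate_nil]
  | cons b bs ih =>
    intro s hs gs
    rw [PySem.List.enumerate_cons]
    simp only [List.foldl_cons]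
    rw [show (s == 0) = false from by simp; omega]
    exact ih (s + 1) (by omega) _

lemma pvA_eq_fold (borders : List Int) :
    divide_into_groups_of_adjecent_borders borders = borders.foldl (fun gs b => pvUpdFirst b gs) [] := by
  cases borders with
  | nil => rfl
  | cons b bs =>
    unfold divide_into_groups_of_adjecent_borders
    rw [PySem.List.enumerate_cons]
    simp only [List.foldl_cons]
    rw [show ((0 : Int) == 0) = true from rfl]
    simp only [if_true, List.nil_append]
    rw [show (0 : Int) + 1 = 1 from by norm_num, pvA_enum bs 1 (by omega) [[b]]]
    rfl

-- ===== VERDICT (by name: the statement is the Claim_ definition above) =====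
theorem divide_into_groups_of_adjecent_borders_spec : Claim_equal_divide_into_groups_of_adjecent_borders := by
  intro borders _
  unfold Spec_divide_into_groups_of_adjecent_borders divide_into_groups_of_adjecent_borders_alt
  rw [pvA_eq_fold, pvFold_eq borders [] PySem.Dict.empty ⟨by simp, fun v => by simp [pvAsc]⟩]
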